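-- pv_equiv track=rewrite | github.com/chainik1125/temp_xc | tests/bench/venhoff/test_tokenization.py | encode_plus
-- ===== SOURCE A (Python) =====
-- def encode_plus(text: str, return_offsets_mapping: bool = True):
--     offsets: list[tuple[int, int]] = []
--     i = 0
--     while i < len(text):
--         while i < len(text) and text[i].isspace():
--             i += 1
--         if i >= len(text):
--             break
--         j = i
--         while j < len(text) and not text[j].isspace():
--             j += 1
--         offsets.append((i, j))
--         i = j
--     return {"offset_mapping": offsets}
-- ===== SOURCE B (Python) =====
-- def encode_plus(text: str, return_offsets_mapping: bool = True):
--     n = len(text)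
--     starts = [i for i in range(n)
--               if not text[i].isspace() and (i == 0 or text[i - 1].isspace())]
--     ends = [i + 1 for i in range(n)
--             if not text[i].isspace() and (i == n - 1 or text[i + 1].isspace())]
--     return {"offset_mapping": list(zip(starts, ends))}
-- ===== Notes on version B (the rewrite author's own statement) =====
-- stated objective: alternative
-- what changed: Replaced A's nested two-pointer while-loop scan with boundary detection: two comprehensions over range(n) pick out token start positions (non-space preceded by start-of-string/space) and token end positions (non-space followed by end-of-string/space), which are then zipped into spans.
import Mathlib
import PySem

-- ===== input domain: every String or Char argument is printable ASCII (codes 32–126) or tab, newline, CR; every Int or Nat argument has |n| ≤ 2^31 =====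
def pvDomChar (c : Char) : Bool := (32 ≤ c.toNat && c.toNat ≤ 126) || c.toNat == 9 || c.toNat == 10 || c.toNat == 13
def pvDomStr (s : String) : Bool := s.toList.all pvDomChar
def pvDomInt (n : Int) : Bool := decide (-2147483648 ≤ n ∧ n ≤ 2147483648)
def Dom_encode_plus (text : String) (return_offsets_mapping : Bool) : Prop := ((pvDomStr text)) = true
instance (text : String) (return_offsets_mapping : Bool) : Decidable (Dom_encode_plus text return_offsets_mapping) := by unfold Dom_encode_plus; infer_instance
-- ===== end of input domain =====

-- B replaces A's nested two-pointer while-loop scan by boundary detection: two passes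
-- over all indices collect token start and end positions, which are zipped into spans
-- (objective: alternative algorithm, same O(n) cost).

-- ===== PORT A =====
-- inner `while i < len(text) and text[i].isspace(): i += 1`
def pvSkipWS (cs : List Char) (i : Nat) : Nat :=
  if h : i < cs.length then
    if PySem.Chars.isspace cs[i] then pvSkipWS cs (i + 1) else i
  else i
termination_by cs.length - i
decreasing_by omega

-- inner `while j < len(text) and not text[j].isspace(): j += 1`
def pvScanTok (cs : List Char) (j : Nat) : Nat :=
  if h : j < cs.length then
    if PySem.Chars.isspace cs[j] then j else pvScanTok cs (j + 1)
  else j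
termination_by cs.length - j
decreasing_by omega

-- facts the outer loop's termination needs
theorem pvSkipWS_ge (cs : List Char) (i : Nat) : i ≤ pvSkipWS cs i := by
  fun_induction pvSkipWS cs i with
  | case1 i h hsp ih => omega
  | case2 i h hsp => omega
  | case3 i h => omega

theorem pvScanTok_ge (cs : List Char) (j : Nat) : j ≤ pvScanTok cs j := by
  fun_induction pvScanTok cs j with
  | case1 j h hsp => omega
  | case2 j h hsp ih => omega
  | case3 j h => omega

theorem pvSkipWS_stop (cs : List Char) (i : Nat) (h : pvSkipWS cs i < cs.length) :
    PySem.Chars.isspace cs[pvSkipWS cs i] = false := by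
  fun_induction pvSkipWS cs i with
  | case1 i h' hsp ih => exact ih h
  | case2 i h' hsp => simpa using hsp
  | case3 i h' => omega

theorem pvScanTok_gt (cs : List Char) (i : Nat) (h : i < cs.length)
    (hns : PySem.Chars.isspace cs[i] = false) : i < pvScanTok cs i := by
  rw [pvScanTok]
  simp only [h, dif_pos, hns, if_neg, Bool.false_eq_true, not_false_eq_true, if_false]
  have := pvScanTok_ge cs (i + 1)
  omega

-- outer `while i < len(text): …`
def pvALoop (cs : List Char) (i : Nat) : List (Int × Int) :=
  if hi : i < cs.length then
    let i' := pvSkipWS cs i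
    if h2 : i' ≥ cs.length then []
    else
      let j := pvScanTok cs i'
      ((i' : Int), (j : Int)) :: pvALoop cs j
  else []
termination_by cs.length - i
decreasing_by
  have h1 : i ≤ pvSkipWS cs i := pvSkipWS_ge cs i
  have h3 : pvSkipWS cs i < pvScanTok cs (pvSkipWS cs i) :=
    pvScanTok_gt cs (pvSkipWS cs i) (by omega) (pvSkipWS_stop cs i (by omega))
  omega

def encode_plus (text : String) (return_offsets_mapping : Bool) : List (String × List (Int × Int)) :=
  [("offset_mapping", pvALoop text.toList 0)]

-- ===== PORT B =====
-- `starts = [i for i in range(n) if not text[i].isspace() and (i == 0 or text[i-1].isspace())]`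
-- (the getD default ' ' at index i-1 is never relevant: the access is guarded by `i == 0 ||`)
def pvStartsB (cs : List Char) : List Nat :=
  (List.range cs.length).filter
    (fun i => !PySem.Chars.isspace (cs.getD i ' ') && (i == 0 || PySem.Chars.isspace (cs.getD (i - 1) ' ')))

-- the filter of `ends = [i + 1 for i in range(n) if not text[i].isspace() and (i == n-1 or text[i+1].isspace())]`
-- (the getD default ' ' at index i+1 is never relevant: the access is guarded by `i == n - 1 ||`)
def pvEndsIdxB (cs : List Char) : List Nat :=
  (List.range cs.length).filter
    (fun i => !PySem.Chars.isspace (cs.getD i ' ') && (i == cs.length - 1 || PySem.Chars.isspace (cs.getD (i + 1) ' ')))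

def encode_plus_alt (text : String) (return_offsets_mapping : Bool) : List (String × List (Int × Int)) :=
  let starts := pvStartsB text.toList
  let ends : List Nat := (pvEndsIdxB text.toList).map (· + 1)
  [("offset_mapping", (starts.zip ends).map (fun p => ((p.1 : Int), (p.2 : Int))))]

-- ===== PRECONDITION & SPEC =====
def Spec_encode_plus (text : String) (return_offsets_mapping : Bool) (out : List (String × List (Int × Int))) : Prop := out = encode_plus_alt text return_offsets_mapping
instance (text : String) (return_offsets_mapping : Bool) (out : List (String × List (Int × Int))) : Decidable (Spec_encode_plus text return_offsets_mapping out) := by unfold Spec_encode_plus; infer_instance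

-- ===== CLAIM (what is proved, stated in full; the proofs are below) =====
def Claim_equal_encode_plus : Prop := ∀ (text : String) (return_offsets_mapping : Bool), Dom_encode_plus text return_offsets_mapping → Spec_encode_plus text return_offsets_mapping (encode_plus text return_offsets_mapping)

-- ===== LEMMAS AND PROOFS =====

-- proof-side helpers: the run decomposition of the string -------------------------

-- (length, remainder) of the maximal prefix whose isspace-class is `b`
def pvTakeRun (b : Bool) : List Char → Nat × List Char
  | [] => (0, [])
  | c :: rest =>
    if PySem.Chars.isspace c == b then
      let p := pvTakeRun b rest
      (p.1 + 1, p.2)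
    else (0, c :: rest)

theorem pvTakeRun_snd_le (b : Bool) (cs : List Char) : (pvTakeRun b cs).2.length ≤ cs.length := by
  induction cs with
  | nil => simp [pvTakeRun]
  | cons c rest ih =>
    simp only [pvTakeRun]
    split
    · simpa using Nat.le_trans ih (Nat.le_succ _)
    · simp

-- the stream of maximal runs: (is_ws, length) of each
def pvRuns : List Char → List (Bool × Nat)
  | [] => []
  | c :: rest =>
    let b := PySem.Chars.isspace c
    let p := pvTakeRun b rest
    (b, p.1 + 1) :: pvRuns p.2
termination_by cs => cs.length
decreasing_by
  have := pvTakeRun_snd_le (PySem.Chars.isspace c) rest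
  simp only [List.length_cons]; omega

-- the spans the run stream denotes, Int version (A's side) and Nat version (B's side)
def pvGo : List (Bool × Nat) → Nat → List (Int × Int)
  | [], _ => []
  | (b, n) :: rs, idx =>
    if b then pvGo rs (idx + n)
    else ((idx : Int), ((idx + n : Nat) : Int)) :: pvGo rs (idx + n)

def pvGoN : List (Bool × Nat) → Nat → List (Nat × Nat)
  | [], _ => []
  | (b, n) :: rs, idx =>
    if b then pvGoN rs (idx + n)
    else (idx, idx + n) :: pvGoN rs (idx + n)

-- A's loop equals the run-stream spans ---------------------------------------------

theorem pvTakeRun_false (cs : List Char) :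
    pvTakeRun false cs = ((cs.takeWhile (fun c => !PySem.Chars.isspace c)).length,
      cs.dropWhile (fun c => !PySem.Chars.isspace c)) := by
  induction cs with
  | nil => simp [pvTakeRun]
  | cons c rest ih =>
    by_cases h : PySem.Chars.isspace c
    · simp [pvTakeRun, h, List.takeWhile_cons, List.dropWhile_cons]
    · simp [pvTakeRun, h, ih, List.takeWhile_cons, List.dropWhile_cons]

theorem pvDropWhile_eq_drop {α : Type} (q : α → Bool) (l : List α) :
    l.dropWhile q = l.drop (l.takeWhile q).length := by
  induction l with
  | nil => simp
  | cons c rest ih =>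
    by_cases h : q c
    · simp [List.dropWhile_cons, List.takeWhile_cons, h, ih]
    · simp [List.dropWhile_cons, List.takeWhile_cons, h]

theorem pvSkipWS_eq (cs : List Char) (i : Nat) :
    pvSkipWS cs i = i + ((cs.drop i).takeWhile (fun c => PySem.Chars.isspace c)).length := by
  fun_induction pvSkipWS cs i with
  | case1 i h hsp ih =>
    rw [List.drop_eq_getElem_cons h, List.takeWhile_cons, if_pos hsp] at *
    simp only [List.length_cons] at *
    omega
  | case2 i h hsp =>
    rw [List.drop_eq_getElem_cons h, List.takeWhile_cons, if_neg (by simpa using hsp)]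
    simp
  | case3 i h =>
    rw [List.drop_eq_nil_of_le (by omega)]
    simp

theorem pvScanTok_eq (cs : List Char) (i : Nat) :
    pvScanTok cs i = i + ((cs.drop i).takeWhile (fun c => !PySem.Chars.isspace c)).length := by
  fun_induction pvScanTok cs i with
  | case1 i h hsp =>
    rw [List.drop_eq_getElem_cons h, List.takeWhile_cons]
    simp [hsp]
  | case2 i h hsp ih =>
    rw [List.drop_eq_getElem_cons h, List.takeWhile_cons, if_pos (by simpa using hsp)] at *
    simp only [List.length_cons] at *
    omega
  | case3 i h =>
    rw [List.drop_eq_nil_of_le (by omega)]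
    simp

theorem pvALoop_ws_step (cs : List Char) (i : Nat) (h : i < cs.length)
    (hsp : PySem.Chars.isspace cs[i] = true) : pvALoop cs i = pvALoop cs (i + 1) := by
  have hskip : pvSkipWS cs i = pvSkipWS cs (i + 1) := by
    rw [pvSkipWS]; simp [h, hsp]
  by_cases h1 : i + 1 < cs.length
  · rw [pvALoop]; conv_rhs => rw [pvALoop]
    simp only [h, h1, dif_pos, hskip]
  · have h2 : pvSkipWS cs (i + 1) = i + 1 := by rw [pvSkipWS]; simp [h1]
    rw [pvALoop]; conv_rhs => rw [pvALoop]
    simp only [h, dif_pos, hskip, h2, dif_neg h1]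
    rw [dif_pos (by omega)]

theorem pvGo_ws_step (c : Char) (r : List Char) (i : Nat)
    (hsp : PySem.Chars.isspace c = true) :
    pvGo (pvRuns (c :: r)) i = pvGo (pvRuns r) (i + 1) := by
  rw [pvRuns]
  simp only [hsp]
  cases r with
  | nil => simp [pvTakeRun, pvRuns, pvGo]
  | cons c' r' =>
    by_cases h' : PySem.Chars.isspace c'
    · rw [pvRuns]
      simp only [h', pvTakeRun, beq_self_eq_true, if_pos, pvGo]
      ring_nf
    · simp only [pvTakeRun, h']
      simp [pvGo, pvRuns, pvTakeRun, h']

theorem pvALoop_eq_go (k : Nat) : ∀ (cs : List Char) (i : Nat), cs.length - i ≤ k →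
    pvALoop cs i = pvGo (pvRuns (cs.drop i)) i := by
  induction k with
  | zero =>
    intro cs i hk
    have hle : cs.length ≤ i := by omega
    rw [List.drop_eq_nil_of_le hle, pvALoop]
    simp [pvRuns, pvGo, Nat.not_lt.mpr hle]
  | succ k ih =>
    intro cs i hk
    by_cases hi : i < cs.length
    · have hdrop := List.drop_eq_getElem_cons hi
      by_cases hsp : PySem.Chars.isspace cs[i]
      · rw [pvALoop_ws_step cs i hi hsp, hdrop, pvGo_ws_step _ _ _ hsp]
        exact ih cs (i + 1) (by omega)
      · have hns : PySem.Chars.isspace cs[i] = false := by simpa using hsp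
        set n := ((cs.drop i).takeWhile (fun c => !PySem.Chars.isspace c)).length with hn
        have hn1 : 1 ≤ n := by
          rw [hn, hdrop, List.takeWhile_cons, if_pos (by simp [hns])]
          simp
        have hscan : pvScanTok cs i = i + n := pvScanTok_eq cs i
        have hskip : pvSkipWS cs i = i := by
          rw [pvSkipWS_eq, hdrop, List.takeWhile_cons, if_neg (by simp [hns])]
          simp
        have hruns : pvRuns (cs.drop i) = (false, n) :: pvRuns (cs.drop (i + n)) := by
          rw [hdrop, pvRuns]
          simp only [hns, pvTakeRun_false]
          have e1 : ((cs.drop (i + 1)).takeWhile (fun c => !PySem.Chars.isspace c)).length = n - 1 := by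
            have : n = ((cs.drop (i + 1)).takeWhile (fun c => !PySem.Chars.isspace c)).length + 1 := by
              rw [hn, hdrop, List.takeWhile_cons, if_pos (by simp [hns])]; simp
            omega
          rw [pvDropWhile_eq_drop, e1, List.drop_drop]
          have e2 : n - 1 + 1 = n := by omega
          have e3 : i + 1 + (n - 1) = i + n := by omega
          rw [e2, e3]
        rw [pvALoop]
        simp only [hi, dif_pos, hskip, hscan]
        rw [dif_neg (by omega), hruns]
        simp only [pvGo, if_neg Bool.false_ne_true]
        rw [ih cs (i + n) (by omega)]
    · have hle : cs.length ≤ i := by omega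
      rw [List.drop_eq_nil_of_le hle, pvALoop]
      simp [pvRuns, pvGo, Nat.not_lt.mpr hle]

-- B's boundary filters equal the run-stream spans ----------------------------------

-- generalisation of pvStartsB: `prev` is the isspace-class of the (virtual) char before the list
def pvStarts (prev : Bool) (cs : List Char) : List Nat :=
  (List.range cs.length).filter
    (fun i => !PySem.Chars.isspace (cs.getD i ' ') &&
      (if i = 0 then prev else PySem.Chars.isspace (cs.getD (i - 1) ' ')))

theorem pvStartsB_eq (cs : List Char) : pvStartsB cs = pvStarts true cs := by
  unfold pvStartsB pvStarts
  apply List.filter_congr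
  intro i _
  cases i <;> simp

theorem pvStarts_cons (prev : Bool) (c : Char) (r : List Char) :
    pvStarts prev (c :: r) =
      (if !PySem.Chars.isspace c && prev then [0] else []) ++
        (pvStarts (PySem.Chars.isspace c) r).map (· + 1) := by
  unfold pvStarts
  rw [List.length_cons, List.range_succ_eq_map, List.filter_cons, List.filter_map]
  have hpred : ∀ i ∈ List.range r.length,
      ((fun i => !PySem.Chars.isspace ((c :: r).getD i ' ') &&
        (if i = 0 then prev else PySem.Chars.isspace ((c :: r).getD (i - 1) ' '))) ∘ Nat.succ) i =
      (fun i => !PySem.Chars.isspace (r.getD i ' ') &&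
        (if i = 0 then PySem.Chars.isspace c else PySem.Chars.isspace (r.getD (i - 1) ' '))) i := by
    intro i _
    cases i with
    | zero => simp
    | succ i' => simp
  rw [List.filter_congr hpred]
  by_cases h : (!PySem.Chars.isspace c && prev) = true
  · simp only [List.getD_cons_zero, if_pos rfl, h, if_pos]
    simp [h]
  · simp only [List.getD_cons_zero, if_pos rfl]
    simp only [Bool.not_eq_true] at h
    simp [h]

theorem pvEndsIdxB_cons (c : Char) (r : List Char) :
    pvEndsIdxB (c :: r) =
      (if !PySem.Chars.isspace c && PySem.Chars.isspace (r.getD 0 ' ') then [0] else []) ++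
        (pvEndsIdxB r).map (· + 1) := by
  unfold pvEndsIdxB
  rw [List.length_cons, List.range_succ_eq_map, List.filter_cons, List.filter_map]
  simp only [Nat.add_sub_cancel]
  have hpred : ∀ i ∈ List.range r.length,
      ((fun i => !PySem.Chars.isspace ((c :: r).getD i ' ') &&
        (i == r.length || PySem.Chars.isspace ((c :: r).getD (i + 1) ' '))) ∘ Nat.succ) i =
      (fun i => !PySem.Chars.isspace (r.getD i ' ') &&
        (i == r.length - 1 || PySem.Chars.isspace (r.getD (i + 1) ' '))) i := by
    intro i hi
    rw [List.mem_range] at hi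
    have h1 : (i + 1 == r.length) = (i == r.length - 1) := by
      rw [Bool.eq_iff_iff]
      simp only [beq_iff_eq]
      omega
    simp only [Function.comp, Nat.succ_eq_add_one, List.getD_cons_succ, h1]
  rw [List.filter_congr hpred]
  simp only [List.getD_cons_succ, List.getD_cons_zero]
  have h0 : ((0 : Nat) == r.length || PySem.Chars.isspace (r.getD 0 ' ')) =
      PySem.Chars.isspace (r.getD 0 ' ') := by
    cases r with
    | nil => decide
    | cons c' r' => simp
  rw [h0]
  by_cases hb : (!PySem.Chars.isspace c && PySem.Chars.isspace (r.getD 0 ' ')) = true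
  · rw [if_pos hb, if_pos hb, List.singleton_append]
  · rw [if_neg hb, if_neg hb, List.nil_append]

-- token lemmas: a maximal non-space prefix contributes one start and one end
theorem pvStarts_token (t rest : List Char) (ht : ∀ x ∈ t, PySem.Chars.isspace x = false) :
    pvStarts false (t ++ rest) = (pvStarts false rest).map (· + t.length) := by
  induction t with
  | nil => simp
  | cons c t' ih =>
    have hc : PySem.Chars.isspace c = false := ht c (by simp)
    rw [List.cons_append, pvStarts_cons, hc, ih (fun x hx => ht x (by simp [hx]))]
    simp only [Bool.and_false, if_neg Bool.false_ne_true, List.nil_append, List.map_map]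
    apply List.map_congr_left
    intro i _
    simp only [Function.comp, List.length_cons]
    omega

theorem pvStarts_prev_irrel (rest : List Char)
    (h : PySem.Chars.isspace (rest.getD 0 ' ') = true) :
    pvStarts false rest = pvStarts true rest := by
  cases rest with
  | nil => rfl
  | cons c r =>
    rw [pvStarts_cons, pvStarts_cons]
    simp only [List.getD_cons_zero] at h
    simp [h]

theorem pvEndsIdxB_token (t rest : List Char) (hne : t ≠ [])
    (ht : ∀ x ∈ t, PySem.Chars.isspace x = false)
    (hr : PySem.Chars.isspace (rest.getD 0 ' ') = true) :
    pvEndsIdxB (t ++ rest) = (t.length - 1) :: (pvEndsIdxB rest).map (· + t.length) := by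
  induction t with
  | nil => exact absurd rfl hne
  | cons c t' ih =>
    have hc : PySem.Chars.isspace c = false := ht c (by simp)
    cases t' with
    | nil =>
      rw [List.cons_append, pvEndsIdxB_cons]
      simp only [List.nil_append] at hr ⊢
      simp [hc, show PySem.Chars.isspace (rest[0]?.getD ' ') = true from hr]
    | cons c2 t'' =>
      have hc2 : PySem.Chars.isspace c2 = false := ht c2 (by simp)
      rw [List.cons_append, pvEndsIdxB_cons,
        ih (by simp) (fun x hx => ht x (by simp [hx]))]
      simp only [List.cons_append, List.getD_cons_zero, hc2, Bool.and_false,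
        if_neg Bool.false_ne_true, List.nil_append, List.map_cons, List.map_map]
      have hlen : (c2 :: t'').length - 1 + 1 = (c :: c2 :: t'').length - 1 := by
        simp
      rw [hlen]
      congr 1

-- run-stream lemmas mirroring those steps
theorem pvTakeRun_false_token (t rest : List Char)
    (ht : ∀ x ∈ t, PySem.Chars.isspace x = false)
    (hr : PySem.Chars.isspace (rest.getD 0 ' ') = true) :
    pvTakeRun false (t ++ rest) = (t.length, rest) := by
  induction t with
  | nil =>
    cases rest with
    | nil => rfl
    | cons c r =>
      simp only [List.getD_cons_zero] at hr
      simp [pvTakeRun, hr]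
  | cons c t' ih =>
    have hc : PySem.Chars.isspace c = false := ht c (by simp)
    rw [List.cons_append, pvTakeRun]
    simp [hc, ih (fun x hx => ht x (by simp [hx]))]

theorem pvRuns_token (t rest : List Char) (hne : t ≠ [])
    (ht : ∀ x ∈ t, PySem.Chars.isspace x = false)
    (hr : PySem.Chars.isspace (rest.getD 0 ' ') = true) :
    pvRuns (t ++ rest) = (false, t.length) :: pvRuns rest := by
  cases t with
  | nil => exact absurd rfl hne
  | cons c t' =>
    have hc : PySem.Chars.isspace c = false := ht c (by simp)
    rw [List.cons_append, pvRuns]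
    simp only [hc, pvTakeRun_false_token t' rest (fun x hx => ht x (by simp [hx])) hr]
    simp

theorem pvGoN_ws_step (c : Char) (r : List Char) (i : Nat)
    (hsp : PySem.Chars.isspace c = true) :
    pvGoN (pvRuns (c :: r)) i = pvGoN (pvRuns r) (i + 1) := by
  rw [pvRuns]
  simp only [hsp]
  cases r with
  | nil => simp [pvTakeRun, pvRuns, pvGoN]
  | cons c' r' =>
    by_cases h' : PySem.Chars.isspace c'
    · rw [pvRuns]
      simp only [h', pvTakeRun, beq_self_eq_true, if_pos, pvGoN]
      ring_nf
    · simp only [pvTakeRun, h']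
      simp [pvGoN, pvRuns, pvTakeRun, h']

theorem pvGoN_shift (rs : List (Bool × Nat)) (i j : Nat) :
    pvGoN rs (i + j) = (pvGoN rs j).map (fun p => (p.1 + i, p.2 + i)) := by
  induction rs generalizing j with
  | nil => simp [pvGoN]
  | cons r rs ih =>
    obtain ⟨b, n⟩ := r
    cases b with
    | true =>
      simp only [pvGoN, if_pos]
      rw [show i + j + n = i + (j + n) by omega, ih]
    | false =>
      simp only [pvGoN, Bool.false_eq_true, if_false, List.map_cons, List.cons.injEq,
        Prod.mk.injEq]
      refine ⟨⟨by omega, by omega⟩, ?_⟩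
      rw [show i + j + n = i + (j + n) by omega, ih]

theorem pvGo_eq_goN (rs : List (Bool × Nat)) (i : Nat) :
    pvGo rs i = (pvGoN rs i).map (fun p => ((p.1 : Int), (p.2 : Int))) := by
  induction rs generalizing i with
  | nil => simp [pvGo, pvGoN]
  | cons r rs ih =>
    obtain ⟨b, n⟩ := r
    cases b with
    | true => simp only [pvGo, pvGoN, if_pos rfl]; exact ih _
    | false =>
      simp only [pvGo, pvGoN, if_neg Bool.false_ne_true, List.map_cons]
      rw [ih]

-- the head of dropWhile (not isspace) is whitespace (or the list is empty; ' ' is whitespace)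
theorem pvDropWhile_head_ws (l : List Char) :
    PySem.Chars.isspace ((l.dropWhile (fun x => !PySem.Chars.isspace x)).getD 0 ' ') = true := by
  induction l with
  | nil => decide
  | cons c r ih =>
    by_cases h : PySem.Chars.isspace c
    · simp [List.dropWhile_cons, h]
    · simpa [List.dropWhile_cons, h] using ih

-- main lemma: B's zipped boundaries equal the run-stream spans
theorem pvZip_eq_goN (k : Nat) : ∀ (cs : List Char), cs.length ≤ k →
    (pvStarts true cs).zip ((pvEndsIdxB cs).map (· + 1)) = pvGoN (pvRuns cs) 0 := by
  induction k with
  | zero =>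
    intro cs hk
    have : cs = [] := List.length_eq_zero_iff.mp (by omega)
    subst this
    simp [pvStarts, pvEndsIdxB, pvRuns, pvGoN]
  | succ k ih =>
    intro cs hk
    cases cs with
    | nil => simp [pvStarts, pvEndsIdxB, pvRuns, pvGoN]
    | cons c r =>
      by_cases hsp : PySem.Chars.isspace c
      · -- whitespace head: everything shifts by one
        rw [pvStarts_cons, pvEndsIdxB_cons]
        simp only [hsp, Bool.not_true, Bool.false_and, Bool.and_false,
          if_neg Bool.false_ne_true, List.nil_append]
        have hsh := pvGoN_shift (pvRuns r) 1 0
        simp only [Nat.add_zero] at hsh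
        rw [pvGoN_ws_step c r 0 hsp, hsh,
          ← ih r (by simp only [List.length_cons] at hk; omega),
          List.zip_map]
        apply List.map_congr_left
        intro p _
        simp [Prod.map]
      · -- non-space head: one token of length t.length+1, then the rest
        have hns : PySem.Chars.isspace c = false := by simpa using hsp
        set t := r.takeWhile (fun x => !PySem.Chars.isspace x) with htdef
        set rest := r.dropWhile (fun x => !PySem.Chars.isspace x) with hrdef
        have hsplit : r = t ++ rest := (List.takeWhile_append_dropWhile).symm
        have ht : ∀ x ∈ t, PySem.Chars.isspace x = false := by
          intro x hx
          have := List.mem_takeWhile_imp hx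
          simpa using this
        have hrest : PySem.Chars.isspace (rest.getD 0 ' ') = true := pvDropWhile_head_ws r
        have hlenr : rest.length ≤ r.length := by
          rw [hrdef]; exact List.length_dropWhile_le _ _
        set n := t.length + 1 with hndef
        -- starts
        have hS : pvStarts true (c :: r) = 0 :: (pvStarts true rest).map (· + n) := by
          rw [pvStarts_cons, hns]
          simp only [Bool.not_false, Bool.and_true, if_pos]
          rw [hsplit, pvStarts_token t rest ht, pvStarts_prev_irrel rest hrest]
          simp only [List.singleton_append, List.map_map]
          congr 1
        -- ends
        have hE : pvEndsIdxB (c :: r) = t.length :: (pvEndsIdxB rest).map (· + n) := by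
          have hcr : c :: r = (c :: t) ++ rest := by rw [hsplit, List.cons_append]
          rw [hcr, pvEndsIdxB_token (c :: t) rest (by simp)
            (by intro x hx
                rcases List.mem_cons.mp hx with h | h
                · subst h; exact hns
                · exact ht x h) hrest]
          simp only [List.length_cons, Nat.add_sub_cancel, hndef]
        -- runs
        have hR : pvRuns (c :: r) = (false, n) :: pvRuns rest := by
          have hcr : c :: r = (c :: t) ++ rest := by rw [hsplit, List.cons_append]
          rw [hcr, pvRuns_token (c :: t) rest (by simp)
            (by intro x hx
                rcases List.mem_cons.mp hx with h | h
                · subst h; exact hns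
                · exact ht x h) hrest]
          simp [hndef]
        rw [hS, hE, hR]
        simp only [pvGoN, Bool.false_eq_true, if_false, List.map_cons, List.zip_cons_cons,
          Nat.zero_add]
        have hlen' : rest.length ≤ k := by
          simp only [List.length_cons] at hk
          omega
        have hsh := pvGoN_shift (pvRuns rest) n 0
        simp only [Nat.add_zero] at hsh
        rw [hsh, ← ih rest hlen']
        have hcomm : List.map (fun x => x + 1) (List.map (fun x => x + n) (pvEndsIdxB rest)) =
            List.map (fun x => x + n) (List.map (fun x => x + 1) (pvEndsIdxB rest)) := by
          simp only [List.map_map]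
          apply List.map_congr_left
          intro x _
          simp only [Function.comp]
          omega
        rw [hcomm, List.zip_map]
        simp only [List.cons.injEq, Prod.mk.injEq]
        refine ⟨⟨trivial, by omega⟩, ?_⟩
        apply List.map_congr_left
        intro p _
        simp [Prod.map]

-- ===== VERDICT (by name: the statement is the Claim_ definition above) =====
theorem encode_plus_spec : Claim_equal_encode_plus := by
  intro text rom _
  unfold Spec_encode_plus encode_plus encode_plus_alt
  rw [pvALoop_eq_go text.toList.length text.toList 0 (by omega), List.drop_zero,
    pvGo_eq_goN, ← pvZip_eq_goN text.toList.length text.toList (by omega), pvStartsB_eq]
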